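-- pv_equiv track=rewrite | github.com/Zyyeric/Aegaeon | aegaeon/aegaeon/loader/loader.py | create_cuts
-- ===== SOURCE A (Python) =====
-- from typing import Optional, List, Tuple, Generator, Type, Dict, TYPE_CHECKING
--
-- def create_cuts(size: int, cuts_num: int) -> List[Tuple[int, int]]:
--     cuts = []
--     mod = size % cuts_num
--     for i in range(cuts_num):
--         if i == 0:
--             start = 0
--         else:
--             start = cuts[i - 1][1]
--         if i == cuts_num - 1:
--             end = size
--         else:
--             end = start + size // cuts_num
--             if i < mod:
--                 end += 1
--         cuts.append((start, end))
--     return cuts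
-- ===== SOURCE B (Python) =====
-- from typing import List, Tuple
--
-- def create_cuts(size: int, cuts_num: int) -> List[Tuple[int, int]]:
--     base, mod = divmod(size, cuts_num)
--     boundary = lambda i: i * base + min(i, mod)
--     return [(boundary(i), boundary(i + 1)) for i in range(cuts_num)]
-- ===== Notes on version B (the rewrite author's own statement) =====
-- stated objective: simpler
-- what changed: Replaces the accumulator loop that reads the previous tuple's end and special-cases i==0 and i==cuts_num-1 by a closed-form boundary formula i*base + min(i, mod) and a single comprehension of (boundary(i), boundary(i+1)).
import Mathlib
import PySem

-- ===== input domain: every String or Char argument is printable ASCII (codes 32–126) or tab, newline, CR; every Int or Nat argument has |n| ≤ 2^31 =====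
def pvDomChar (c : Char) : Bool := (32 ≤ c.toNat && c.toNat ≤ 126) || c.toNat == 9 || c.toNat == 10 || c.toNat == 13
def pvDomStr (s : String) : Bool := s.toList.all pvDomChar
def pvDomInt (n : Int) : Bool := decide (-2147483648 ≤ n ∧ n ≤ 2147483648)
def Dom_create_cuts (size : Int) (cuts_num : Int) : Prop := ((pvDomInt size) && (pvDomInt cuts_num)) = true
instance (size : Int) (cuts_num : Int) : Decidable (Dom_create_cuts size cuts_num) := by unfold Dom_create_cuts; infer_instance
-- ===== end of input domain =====

-- B replaces A's accumulator loop (previous tuple's end + i==0 / i==cuts_num-1 special cases)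
-- by a closed-form boundary formula; same values, objective: simpler.

-- ===== PORT A =====
-- cuts[i-1][1]: inside the loop the index i-1 is always valid (the list has i elements),
-- so pyGetD with a dummy default is exact here.
def create_cuts (size : Int) (cuts_num : Int) : List (Int × Int) :=
  let md := PySem.Int.mod size cuts_num
  (PySem.List.pyRange 0 cuts_num 1).foldl (fun cuts i =>
    let start : Int := if i = 0 then 0 else (PySem.List.pyGetD cuts (i - 1) (0, 0)).2
    let e : Int :=
      if i = cuts_num - 1 then size
      else (start + PySem.Int.floordiv size cuts_num) + (if i < md then 1 else 0)
    cuts ++ [(start, e)]) []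

-- ===== PORT B =====
def create_cuts_alt (size : Int) (cuts_num : Int) : List (Int × Int) :=
  let base := PySem.Int.floordiv size cuts_num
  let md := PySem.Int.mod size cuts_num
  (PySem.List.pyRange 0 cuts_num 1).map (fun i =>
    (i * base + min i md, (i + 1) * base + min (i + 1) md))

-- ===== PRECONDITION & SPEC =====
-- Python raises ZeroDivisionError (size % cuts_num) when cuts_num = 0; excluded.
def Pre_create_cuts (size : Int) (cuts_num : Int) : Prop := cuts_num ≠ 0
instance (size : Int) (cuts_num : Int) : Decidable (Pre_create_cuts size cuts_num) := by unfold Pre_create_cuts; infer_instance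
def pvWitness_create_cuts : Int × Int := (10, 3)
def Spec_create_cuts (size : Int) (cuts_num : Int) (out : List (Int × Int)) : Prop := out = create_cuts_alt size cuts_num
instance (size : Int) (cuts_num : Int) (out : List (Int × Int)) : Decidable (Spec_create_cuts size cuts_num out) := by unfold Spec_create_cuts; infer_instance

-- ===== CLAIM (what is proved, stated in full; the proofs are below) =====
def Claim_equal_create_cuts : Prop := ∀ (size : Int) (cuts_num : Int), Dom_create_cuts size cuts_num → Pre_create_cuts size cuts_num → Spec_create_cuts size cuts_num (create_cuts size cuts_num)

-- ===== LEMMAS AND PROOFS =====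

-- A's fold, with its step function named for the proofs.
def pvStepA (size cuts_num md : Int) (cuts : List (Int × Int)) (i : Int) : List (Int × Int) :=
  let start : Int := if i = 0 then 0 else (PySem.List.pyGetD cuts (i - 1) (0, 0)).2
  let e : Int :=
    if i = cuts_num - 1 then size
    else (start + PySem.Int.floordiv size cuts_num) + (if i < md then 1 else 0)
  cuts ++ [(start, e)]

-- B's per-index tuple.
def pvFB (size cuts_num : Int) (i : Int) : Int × Int :=
  (i * PySem.Int.floordiv size cuts_num + min i (PySem.Int.mod size cuts_num),
   (i + 1) * PySem.Int.floordiv size cuts_num + min (i + 1) (PySem.Int.mod size cuts_num))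

theorem pv_invariant (size cuts_num : Int) (hpos : 0 < cuts_num) :
    ∀ k : Nat, (k : Int) ≤ cuts_num →
      (PySem.List.pyRange 0 (k : Int) 1).foldl
        (pvStepA size cuts_num (PySem.Int.mod size cuts_num)) []
      = (PySem.List.pyRange 0 (k : Int) 1).map (pvFB size cuts_num) := by
  have hdm := PySem.Int.floordiv_mul_add_mod size cuts_num
  have hm0 : 0 ≤ PySem.Int.mod size cuts_num := by
    rw [PySem.Int.mod_eq_emod_of_pos hpos]; exact Int.emod_nonneg _ (by omega)
  have hmlt : PySem.Int.mod size cuts_num < cuts_num := by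
    rw [PySem.Int.mod_eq_emod_of_pos hpos]; exact Int.emod_lt_of_pos _ hpos
  intro k
  induction k with
  | zero => intro _; simp [PySem.List.pyRange_zero]
  | succ k ih =>
    intro hk
    have hk' : (k : Int) ≤ cuts_num := by push_cast at hk ⊢; omega
    have hsplit : PySem.List.pyRange 0 ((k : Int) + 1) 1
        = PySem.List.pyRange 0 (k : Int) 1 ++ [(k : Int)] :=
      PySem.List.pyRange_one_succ_right (by positivity)
    push_cast
    rw [hsplit, List.foldl_append, List.map_append, ih hk']
    simp only [List.foldl_cons, List.foldl_nil, List.map_cons, List.map_nil]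
    congr 1
    -- the new element added at index k equals pvFB size cuts_num k
    have hstart : (if (k : Int) = 0 then (0 : Int)
        else (PySem.List.pyGetD ((PySem.List.pyRange 0 (k : Int) 1).map (pvFB size cuts_num)) ((k : Int) - 1) (0, 0)).2)
        = (k : Int) * PySem.Int.floordiv size cuts_num + min (k : Int) (PySem.Int.mod size cuts_num) := by
      by_cases h0 : k = 0
      · subst h0; simp [min_eq_left hm0]
      · have hk1 : (1 : Nat) ≤ k := Nat.one_le_iff_ne_zero.mpr h0
        have : ((k : Int) - 1) = ((k - 1 : Nat) : Int) := by push_cast; omega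
        rw [if_neg (by exact_mod_cast h0), this,
          PySem.List.pyGetD_map_pyRange (pvFB size cuts_num) k (k - 1) (0,0) (by omega)]
        have hcast : ((k - 1 : Nat) : Int) + 1 = (k : Int) := by push_cast; omega
        simp [pvFB, hcast]
    simp only [pvStepA]
    rw [hstart]
    by_cases hlast : (k : Int) = cuts_num - 1
    · -- last index: A writes size; B's boundary(k+1) = size
      rw [if_pos hlast]
      have : pvFB size cuts_num (k : Int)
          = ((k : Int) * PySem.Int.floordiv size cuts_num + min (k : Int) (PySem.Int.mod size cuts_num), size) := by
        unfold pvFB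
        have hmin : min ((k : Int) + 1) (PySem.Int.mod size cuts_num) = PySem.Int.mod size cuts_num := by
          omega
        rw [hmin]
        have : ((k : Int) + 1) * PySem.Int.floordiv size cuts_num + PySem.Int.mod size cuts_num = size := by
          have hk2 : (k : Int) + 1 = cuts_num := by omega
          rw [hk2, mul_comm]; exact hdm
        rw [this]
      rw [this]
    · -- interior index: end = start + base (+1 if k < mod)
      rw [if_neg hlast]
      unfold pvFB
      have hklt : (k : Int) < PySem.Int.mod size cuts_num ∨ PySem.Int.mod size cuts_num ≤ (k : Int) := lt_or_ge _ _
      rcases hklt with h | h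
      · rw [if_pos h]
        have h1 : min ((k : Int)) (PySem.Int.mod size cuts_num) = (k : Int) := by omega
        have h2 : min ((k : Int) + 1) (PySem.Int.mod size cuts_num) = (k : Int) + 1 := by omega
        rw [h1, h2]; simp only [List.append_cancel_left_eq, List.cons.injEq, and_true, Prod.mk.injEq]
        constructor <;> first | trivial | ring
      · rw [if_neg (by omega)]
        have h1 : min ((k : Int)) (PySem.Int.mod size cuts_num) = PySem.Int.mod size cuts_num := by omega
        have h2 : min ((k : Int) + 1) (PySem.Int.mod size cuts_num) = PySem.Int.mod size cuts_num := by omega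
        rw [h1, h2]; simp only [List.append_cancel_left_eq, List.cons.injEq, and_true, Prod.mk.injEq]
        constructor <;> first | trivial | ring

-- ===== VERDICT (by name: the statement is the Claim_ definition above) =====
theorem create_cuts_spec : Claim_equal_create_cuts := by
  intro size cuts_num _ hpre
  unfold Spec_create_cuts create_cuts create_cuts_alt
  by_cases hpos : 0 < cuts_num
  · have hmain := pv_invariant size cuts_num hpos cuts_num.toNat (by omega)
    have hc : ((cuts_num.toNat : Nat) : Int) = cuts_num := by omega
    rw [hc] at hmain
    simpa [pvStepA, pvFB] using hmain
  · have hneg : cuts_num < 0 := by unfold Pre_create_cuts at hpre; omega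
    rw [PySem.List.pyRange_one_eq_nil (by omega)]
    simp
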